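-- pv_equiv track=rewrite | github.com/YxZhang-XHCY/eccToolkit | src/ecctoolkit/simulate/rca_readsim/error_models/nanopore.py | _find_homopolymers
-- ===== SOURCE A (Python) =====
-- from typing import Tuple, Optional, List
--
-- def _find_homopolymers(sequence: str, min_length: int = 4) -> List[Tuple[int, int]]:
--     """找出同聚物区域"""
--     regions = []
--     i = 0
--     while i < len(sequence):
--         base = sequence[i]
--         run_start = i
--         while i < len(sequence) and sequence[i] == base:
--             i += 1
--         run_len = i - run_start
--         if run_len >= min_length:
--             regions.append((run_start, i))
--     return regions
-- ===== SOURCE B (Python) =====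
-- from typing import Tuple, List
--
-- def _find_homopolymers(sequence: str, min_length: int = 4) -> List[Tuple[int, int]]:
--     n = len(sequence)
--     if n == 0:
--         return []
--     # boundary positions: 0, every index where the character changes, and n
--     bounds = [0] + [k + 1 for k, (x, y) in enumerate(zip(sequence, sequence[1:])) if x != y] + [n]
--     return [(s, e) for s, e in zip(bounds, bounds[1:]) if e - s >= min_length]
-- ===== Notes on version B (the rewrite author's own statement) =====
-- stated objective: alternative
-- what changed: Instead of A's online two-pointer scan that measures each run as it goes, B first computes the list of all run-boundary positions by comparing the string with its own shift (zip(sequence, sequence[1:])), then pairs consecutive boundaries and keeps the pairs whose span is at least min_length.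
import Mathlib
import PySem

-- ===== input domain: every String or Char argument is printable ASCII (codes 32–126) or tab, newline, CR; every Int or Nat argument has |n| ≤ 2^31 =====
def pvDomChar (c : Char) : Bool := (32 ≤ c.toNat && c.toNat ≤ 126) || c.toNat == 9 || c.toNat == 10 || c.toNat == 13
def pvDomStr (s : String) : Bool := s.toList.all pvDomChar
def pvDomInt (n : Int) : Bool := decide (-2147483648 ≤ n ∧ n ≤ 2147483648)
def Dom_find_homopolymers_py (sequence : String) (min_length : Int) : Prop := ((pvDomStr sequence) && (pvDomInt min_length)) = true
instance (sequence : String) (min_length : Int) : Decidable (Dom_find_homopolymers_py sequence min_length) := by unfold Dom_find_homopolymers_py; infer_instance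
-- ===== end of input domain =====

-- B computes all run-boundary positions first (string zipped with its own shift),
-- then pairs consecutive boundaries, instead of A's online two-pointer scan; same cost.

-- ===== PORT A =====
-- inner while loop: while i < len(sequence) and sequence[i] == base: i += 1
-- returns (number of further chars consumed, remaining suffix)
def pvScanA (base : Char) : List Char → Nat × List Char
  | [] => (0, [])
  | c :: rest =>
    if c = base then
      let p := pvScanA base rest
      (p.1 + 1, p.2)
    else (0, c :: rest)

theorem pvScanA_len (base : Char) (l : List Char) : (pvScanA base l).2.length ≤ l.length := by
  induction l with
  | nil => simp [pvScanA]
  | cons c rest ih =>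
    simp only [pvScanA]
    split
    · exact le_trans ih (Nat.le_succ _)
    · simp

-- outer while loop over the remaining characters, carrying the index i
def pvLoopA (min_length : Int) : List Char → Int → List (Int × Int)
  | [], _ => []
  | c :: rest, i =>
    let p := pvScanA c rest
    let run_len : Int := (p.1 : Int) + 1
    let tail := pvLoopA min_length p.2 (i + run_len)
    if run_len ≥ min_length then (i, i + run_len) :: tail else tail
termination_by cs _ => cs.length
decreasing_by
  exact Nat.lt_succ_of_le (pvScanA_len c rest)

def find_homopolymers_py (sequence : String) (min_length : Int) : List (Int × Int) :=
  pvLoopA min_length sequence.toList 0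

-- ===== PORT B =====
-- bounds = [0] + [k+1 for k,(x,y) in enumerate(zip(sequence, sequence[1:])) if x != y] + [n]
-- return [(s,e) for s,e in zip(bounds, bounds[1:]) if e - s >= min_length]
def find_homopolymers_py_alt (sequence : String) (min_length : Int) : List (Int × Int) :=
  let cs := sequence.toList
  let n := cs.length
  if n = 0 then []
  else
    let bounds : List Nat :=
      0 :: ((cs.zip cs.tail).zipIdx.filterMap
              (fun p => if p.1.1 ≠ p.1.2 then some (p.2 + 1) else none)) ++ [n]
    (bounds.zip bounds.tail).filterMap
      (fun q => if (q.2 : Int) - (q.1 : Int) ≥ min_length then some ((q.1 : Int), (q.2 : Int)) else none)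

-- ===== PRECONDITION & SPEC =====
def Spec_find_homopolymers_py (sequence : String) (min_length : Int) (out : List (Int × Int)) : Prop := out = find_homopolymers_py_alt sequence min_length
instance (sequence : String) (min_length : Int) (out : List (Int × Int)) : Decidable (Spec_find_homopolymers_py sequence min_length out) := by unfold Spec_find_homopolymers_py; infer_instance

-- ===== CLAIM (what is proved, stated in full; the proofs are below) =====
def Claim_equal_find_homopolymers_py : Prop := ∀ (sequence : String) (min_length : Int), Dom_find_homopolymers_py sequence min_length → Spec_find_homopolymers_py sequence min_length (find_homopolymers_py sequence min_length)

-- ===== LEMMAS AND PROOFS =====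

-- proof-side intermediate: maximal runs as (base, run_len) pairs
def pvGroupsB : List Char → List (Char × Nat)
  | [] => []
  | c :: rest =>
    match pvGroupsB rest with
    | (d, n) :: gs => if c = d then (d, n + 1) :: gs else (c, 1) :: (d, n) :: gs
    | [] => [(c, 1)]

-- proof-side intermediate: emit regions from runs with a position accumulator
def pvEmitB (min_length : Int) : List (Char × Nat) → Int → List (Int × Int)
  | [], _ => []
  | g :: gs, pos =>
    let rest := pvEmitB min_length gs (pos + (g.2 : Int))
    if (g.2 : Int) ≥ min_length then (pos, pos + (g.2 : Int)) :: rest else rest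

-- proof-side: prefix sums of run lengths = the boundary list
def pvSums : List (Char × Nat) → Nat → List Nat
  | [], p => [p]
  | g :: gs, p => p :: pvSums gs (p + g.2)

-- B's two stages, named for the proofs (definitionally the port's expressions)
def pvCutsOf (cs : List Char) (j : Nat) : List Nat :=
  ((cs.zip cs.tail).zipIdx j).filterMap (fun p => if p.1.1 ≠ p.1.2 then some (p.2 + 1) else none)

def pvZF (min_length : Int) (bounds : List Nat) : List (Int × Int) :=
  (bounds.zip bounds.tail).filterMap
    (fun q => if (q.2 : Int) - (q.1 : Int) ≥ min_length then some ((q.1 : Int), (q.2 : Int)) else none)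

-- B's grouping peels off exactly the run that A's inner scan consumes
theorem pvGroupsB_cons (rest : List Char) : ∀ (c : Char),
    pvGroupsB (c :: rest) = (c, (pvScanA c rest).1 + 1) :: pvGroupsB (pvScanA c rest).2 := by
  induction rest with
  | nil => intro c; simp [pvGroupsB, pvScanA]
  | cons d t ih =>
    intro c
    have hstep : ∀ e : Char, pvGroupsB (e :: d :: t) = (match pvGroupsB (d :: t) with
        | (d', n) :: gs => if e = d' then (d', n + 1) :: gs else (e, 1) :: (d', n) :: gs
        | [] => [(e, 1)]) := fun _ => rfl
    by_cases h : c = d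
    · subst h
      rw [hstep c, ih c]
      simp [pvScanA]
    · have h' : ¬ d = c := fun e => h e.symm
      rw [hstep c, ih d]
      simp [pvScanA, h, h', ih d]

-- A's two-pointer loop computes the run-wise emission
theorem pvLoopA_eq_emit (min_length : Int) : ∀ (n : Nat) (cs : List Char) (i : Int),
    cs.length ≤ n → pvLoopA min_length cs i = pvEmitB min_length (pvGroupsB cs) i := by
  intro n
  induction n with
  | zero =>
    intro cs i h
    have : cs = [] := List.eq_nil_of_length_eq_zero (Nat.le_zero.mp h)
    subst this; simp [pvLoopA, pvGroupsB, pvEmitB]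
  | succ n ih =>
    intro cs i h
    match cs with
    | [] => simp [pvLoopA, pvGroupsB, pvEmitB]
    | c :: rest =>
      rw [pvGroupsB_cons]
      simp only [pvLoopA, pvEmitB]
      have hlen : (pvScanA c rest).2.length ≤ n :=
        le_trans (pvScanA_len c rest) (Nat.le_of_succ_le_succ h)
      rw [ih _ _ hlen]
      push_cast
      ring_nf

theorem pvSums_head (gs : List (Char × Nat)) (p : Nat) :
    pvSums gs p = p :: (pvSums gs p).tail := by
  cases gs <;> simp [pvSums]

-- B's boundary list is exactly the prefix sums of the run lengths
theorem pvCuts_eq_sums : ∀ (t : List Char) (c : Char) (j : Nat),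
    j :: pvCutsOf (c :: t) j ++ [j + (c :: t).length] = pvSums (pvGroupsB (c :: t)) j := by
  intro t
  induction t with
  | nil =>
    intro c j
    simp [pvCutsOf, pvGroupsB, pvSums]
  | cons d t' ih =>
    intro c j
    have hcut : pvCutsOf (c :: d :: t') j =
        (if c ≠ d then [j + 1] else []) ++ pvCutsOf (d :: t') (j + 1) := by
      simp only [pvCutsOf, List.tail_cons, List.zip_cons_cons, List.zipIdx_cons,
        List.filterMap_cons]
      split_ifs with h <;> simp
    by_cases h : c = d
    · subst h
      rw [hcut]
      simp only [ne_eq, not_true_eq_false, if_false, List.nil_append]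
      have hIH := ih c (j + 1)
      rw [pvGroupsB_cons t' c] at hIH
      have hg : pvGroupsB (c :: c :: t') =
          (c, (pvScanA c t').1 + 1 + 1) :: pvGroupsB (pvScanA c t').2 := by
        have hstep : pvGroupsB (c :: c :: t') = (match pvGroupsB (c :: t') with
            | (d', n) :: gs => if c = d' then (d', n + 1) :: gs else (c, 1) :: (d', n) :: gs
            | [] => [(c, 1)]) := rfl
        rw [hstep, pvGroupsB_cons t' c]
        simp
      rw [hg]
      simp only [pvSums] at hIH ⊢
      have htail : pvCutsOf (c :: t') (j + 1) ++ [j + 1 + (c :: t').length] =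
          pvSums (pvGroupsB (pvScanA c t').2) (j + 1 + ((pvScanA c t').1 + 1)) :=
        List.tail_eq_of_cons_eq hIH
      have harith : j + 1 + (c :: t').length = j + (c :: c :: t').length := by
        simp; omega
      have harith2 : j + 1 + ((pvScanA c t').1 + 1) = j + ((pvScanA c t').1 + 1 + 1) := by omega
      rw [harith] at htail
      rw [← harith2]
      simp only [List.cons_append]
      rw [htail]
    · rw [hcut]
      simp only [ne_eq, h, not_false_iff, if_true]
      have hIH := ih d (j + 1)
      have hg : pvGroupsB (c :: d :: t') = (c, 1) :: pvGroupsB (d :: t') := by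
        have hstep : pvGroupsB (c :: d :: t') = (match pvGroupsB (d :: t') with
            | (d', n) :: gs => if c = d' then (d', n + 1) :: gs else (c, 1) :: (d', n) :: gs
            | [] => [(c, 1)]) := rfl
        rw [hstep, pvGroupsB_cons t' d]
        simp [h]
      rw [hg]
      simp only [pvSums]
      have harith : j + 1 + (d :: t').length = j + (c :: d :: t').length := by
        simp; omega
      rw [harith] at hIH
      rw [← hIH]
      simp

-- pairing consecutive boundaries and filtering = the accumulator emission
theorem pvZF_sums (min_length : Int) : ∀ (gs : List (Char × Nat)) (pos : Nat),
    pvZF min_length (pvSums gs pos) = pvEmitB min_length gs (pos : Int) := by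
  intro gs
  induction gs with
  | nil => intro pos; simp [pvSums, pvZF, pvEmitB]
  | cons g gs ih =>
    intro pos
    have hrest := ih (pos + g.2)
    simp only [pvZF] at hrest
    simp only [pvSums]
    rw [pvSums_head gs (pos + g.2)]
    simp only [pvZF, List.tail_cons, List.zip_cons_cons, List.filterMap_cons]
    rw [← pvSums_head gs (pos + g.2)]
    simp only [pvEmitB]
    push_cast at hrest ⊢
    split_ifs with h1 h2 h2 <;> simp_all

-- ===== VERDICT (by name: the statement is the Claim_ definition above) =====
theorem find_homopolymers_py_spec : Claim_equal_find_homopolymers_py := by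
  intro sequence min_length _
  unfold Spec_find_homopolymers_py find_homopolymers_py find_homopolymers_py_alt
  cases hcs : sequence.toList with
  | nil => simp [pvLoopA]
  | cons c t =>
    simp only [List.length_cons, Nat.succ_ne_zero, if_false]
    have hb : (0 : Nat) :: ((((c :: t).zip (c :: t).tail).zipIdx.filterMap
          (fun p => if p.1.1 ≠ p.1.2 then some (p.2 + 1) else none))) ++ [(c :: t).length]
        = pvSums (pvGroupsB (c :: t)) 0 := by
      have := pvCuts_eq_sums t c 0
      simpa [pvCutsOf] using this
    calc pvLoopA min_length (c :: t) 0
        = pvEmitB min_length (pvGroupsB (c :: t)) 0 :=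
          pvLoopA_eq_emit min_length (c :: t).length (c :: t) 0 le_rfl
      _ = pvZF min_length (pvSums (pvGroupsB (c :: t)) 0) := (pvZF_sums min_length _ 0).symm
      _ = _ := by rw [← hb]; rfl
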